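-- pv_equiv track=rewrite | github.com/robmillersoftware/mtg-deckbuilder | src/explanation/deck_explainer.py | _categorize_sideboard_cards
-- ===== SOURCE A (Python) =====
-- from typing import Dict, List, Optional, Tuple
-- from collections import Counter, defaultdict
--
-- def _categorize_sideboard_cards(sideboard: List[Dict]) -> Dict[str, List[Dict]]:
--     """Categorize sideboard cards by purpose"""
--     categories = defaultdict(list)
--
--     for card in sideboard:
--         name_lower = card['name'].lower()
--
--         if any(word in name_lower for word in ['destroy', 'murder', 'exile']):
--             categories['removal'].append(card)
--         elif any(word in name_lower for word in ['counter', 'negate']):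
--             categories['counterspells'].append(card)
--         elif any(word in name_lower for word in ['wrath', 'sweep', 'board']):
--             categories['board_wipes'].append(card)
--         elif any(word in name_lower for word in ['enchantment', 'artifact']):
--             categories['hate'].append(card)
--         else:
--             categories['flex'].append(card)
--
--     return dict(categories)
-- ===== SOURCE B (Python) =====
-- def _categorize_sideboard_cards(sideboard):
--     """Categorize sideboard cards by purpose (classify-then-group)."""
--     rules = [
--         ('removal', ['destroy', 'murder', 'exile']),
--         ('counterspells', ['counter', 'negate']),
--         ('board_wipes', ['wrath', 'sweep', 'board']),
--         ('hate', ['enchantment', 'artifact']),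
--     ]
--
--     def classify(card):
--         name_lower = card['name'].lower()
--         for cat, words in rules:
--             if any(w in name_lower for w in words):
--                 return cat
--         return 'flex'
--
--     order = list(dict.fromkeys(classify(c) for c in sideboard))
--     return {cat: [c for c in sideboard if classify(c) == cat] for cat in order}
-- ===== Notes on version B (the rewrite author's own statement) =====
-- stated objective: idiomatic
-- what changed: Replaces the inline if/elif cascade appending into a defaultdict with a data-driven rule table and a classify helper, then builds the result by first-occurrence key order plus per-category comprehensions (classify-then-group instead of incremental mutation).
import Mathlib
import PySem

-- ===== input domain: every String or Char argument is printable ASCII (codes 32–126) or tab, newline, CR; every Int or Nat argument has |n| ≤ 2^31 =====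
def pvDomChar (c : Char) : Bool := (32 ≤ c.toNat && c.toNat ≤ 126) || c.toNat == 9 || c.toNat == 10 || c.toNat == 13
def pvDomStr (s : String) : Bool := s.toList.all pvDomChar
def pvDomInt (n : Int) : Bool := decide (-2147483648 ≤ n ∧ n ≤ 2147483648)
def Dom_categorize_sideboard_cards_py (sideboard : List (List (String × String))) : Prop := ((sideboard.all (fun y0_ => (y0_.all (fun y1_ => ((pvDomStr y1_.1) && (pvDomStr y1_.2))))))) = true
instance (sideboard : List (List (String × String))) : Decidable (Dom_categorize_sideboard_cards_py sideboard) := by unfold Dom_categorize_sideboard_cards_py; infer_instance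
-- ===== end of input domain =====

-- B recasts A's if/elif defaultdict loop as classify-then-group over a rule table (idiomatic; same behaviour).

-- card['name']: first-match association-list lookup; the default "" is never reached under Pre_ (missing key = KeyError in Python).
def pvCardName (card : List (String × String)) : String :=
  ((PySem.Dict.mk card).get? "name").getD ""

-- ===== PORT A =====
def categorize_sideboard_cards_py (sideboard : List (List (String × String))) : List (String × List (List (String × String))) :=
  (sideboard.foldl (fun cats card =>
    let nl := PySem.Str.lower (pvCardName card)
    if (["destroy", "murder", "exile"].any (fun w => PySem.Str.isIn w nl)) then
      cats.modify "removal" [] (· ++ [card])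
    else if (["counter", "negate"].any (fun w => PySem.Str.isIn w nl)) then
      cats.modify "counterspells" [] (· ++ [card])
    else if (["wrath", "sweep", "board"].any (fun w => PySem.Str.isIn w nl)) then
      cats.modify "board_wipes" [] (· ++ [card])
    else if (["enchantment", "artifact"].any (fun w => PySem.Str.isIn w nl)) then
      cats.modify "hate" [] (· ++ [card])
    else
      cats.modify "flex" [] (· ++ [card])) PySem.Dict.empty).items

-- ===== PORT B =====
def pvRules : List (String × List String) :=
  [("removal", ["destroy", "murder", "exile"]),
   ("counterspells", ["counter", "negate"]),
   ("board_wipes", ["wrath", "sweep", "board"]),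
   ("hate", ["enchantment", "artifact"])]

def pvClassifyGo (nl : String) : List (String × List String) → String
  | [] => "flex"
  | (cat, ws) :: rs => if ws.any (fun w => PySem.Str.isIn w nl) then cat else pvClassifyGo nl rs

def pvClassify (card : List (String × String)) : String :=
  pvClassifyGo (PySem.Str.lower (pvCardName card)) pvRules

def categorize_sideboard_cards_py_alt (sideboard : List (List (String × String))) : List (String × List (List (String × String))) :=
  let order := PySem.List.dedup (sideboard.map pvClassify)
  order.map (fun cat => (cat, sideboard.filter (fun c => pvClassify c == cat)))

-- ===== PRECONDITION & SPEC =====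
-- Pre_ excludes cards without a 'name' key, on which the Python A raises KeyError.
def Pre_categorize_sideboard_cards_py (sideboard : List (List (String × String))) : Prop :=
  sideboard.all (fun card => card.any (fun p => p.1 == "name")) = true
instance (sideboard : List (List (String × String))) : Decidable (Pre_categorize_sideboard_cards_py sideboard) := by unfold Pre_categorize_sideboard_cards_py; infer_instance

def pvWitness_categorize_sideboard_cards_py : (List (List (String × String))) :=
  [[("name", "Murder")], [("name", "Llanowar Elves")]]

def Spec_categorize_sideboard_cards_py (sideboard : List (List (String × String))) (out : List (String × List (List (String × String)))) : Prop := out = categorize_sideboard_cards_py_alt sideboard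
instance (sideboard : List (List (String × String))) (out : List (String × List (List (String × String)))) : Decidable (Spec_categorize_sideboard_cards_py sideboard out) := by unfold Spec_categorize_sideboard_cards_py; infer_instance

-- ===== CLAIM (what is proved, stated in full; the proofs are below) =====
def Claim_equal_categorize_sideboard_cards_py : Prop := ∀ (sideboard : List (List (String × String))), Dom_categorize_sideboard_cards_py sideboard → Pre_categorize_sideboard_cards_py sideboard → Spec_categorize_sideboard_cards_py sideboard (categorize_sideboard_cards_py sideboard)

-- ===== LEMMAS AND PROOFS =====

-- A's loop body is 'append the card under its pvClassify label'.
theorem pv_step_eq (cats : PySem.Dict String (List (List (String × String)))) (card : List (String × String)) :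
    (let nl := PySem.Str.lower (pvCardName card)
     if (["destroy", "murder", "exile"].any (fun w => PySem.Str.isIn w nl)) then
       cats.modify "removal" [] (· ++ [card])
     else if (["counter", "negate"].any (fun w => PySem.Str.isIn w nl)) then
       cats.modify "counterspells" [] (· ++ [card])
     else if (["wrath", "sweep", "board"].any (fun w => PySem.Str.isIn w nl)) then
       cats.modify "board_wipes" [] (· ++ [card])
     else if (["enchantment", "artifact"].any (fun w => PySem.Str.isIn w nl)) then
       cats.modify "hate" [] (· ++ [card])
     else
       cats.modify "flex" [] (· ++ [card]))
    = cats.modify (pvClassify card) [] (· ++ [card]) := by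
  simp only [pvClassify, pvRules, pvClassifyGo]
  split_ifs <;> rfl

-- ===== VERDICT (by name: the statement is the Claim_ definition above) =====
-- the grouping dict's keys are the labels in first-occurrence order
theorem pv_keys_eq (sideboard : List (List (String × String))) :
    (sideboard.foldl (fun d c => d.modify (pvClassify c) [] (· ++ [c])) PySem.Dict.empty).keys
      = PySem.List.dedup (sideboard.map pvClassify) := by
  rw [PySem.Dict.keys_foldl_modify_key]
  simp [PySem.Set.ofList_eq_foldl, PySem.Set.update]

-- each label's bucket holds exactly the cards classified to it, in order
theorem pv_getD_eq (sideboard : List (List (String × String))) (k : String) :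
    (sideboard.foldl (fun d c => d.modify (pvClassify c) [] (· ++ [c])) PySem.Dict.empty).getD k []
      = sideboard.filter (fun c => pvClassify c == k) := by
  have h1 : sideboard.foldl (fun d c => d.modify (pvClassify c) [] (· ++ [c])) PySem.Dict.empty
      = (sideboard.map (fun c => (pvClassify c, c))).foldl (fun d p => d.modify p.1 [] (· ++ [p.2])) PySem.Dict.empty := by
    rw [List.foldl_map]
  rw [h1, PySem.Dict.getD_foldl_modify_append]
  simp [List.filter_map, Function.comp_def]

-- ===== VERDICT (by name: the statement is the Claim_ definition above) =====
theorem categorize_sideboard_cards_py_spec : Claim_equal_categorize_sideboard_cards_py := by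
  intro sideboard _ _
  unfold Spec_categorize_sideboard_cards_py categorize_sideboard_cards_py categorize_sideboard_cards_py_alt
  have hfold : sideboard.foldl (fun cats card =>
      let nl := PySem.Str.lower (pvCardName card)
      if (["destroy", "murder", "exile"].any (fun w => PySem.Str.isIn w nl)) then
        cats.modify "removal" [] (· ++ [card])
      else if (["counter", "negate"].any (fun w => PySem.Str.isIn w nl)) then
        cats.modify "counterspells" [] (· ++ [card])
      else if (["wrath", "sweep", "board"].any (fun w => PySem.Str.isIn w nl)) then
        cats.modify "board_wipes" [] (· ++ [card])
      else if (["enchantment", "artifact"].any (fun w => PySem.Str.isIn w nl)) then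
        cats.modify "hate" [] (· ++ [card])
      else
        cats.modify "flex" [] (· ++ [card])) PySem.Dict.empty
      = sideboard.foldl (fun d c => d.modify (pvClassify c) [] (· ++ [c])) PySem.Dict.empty := by
    apply PySem.List.foldl_congr_mem
    intro cats card _
    exact pv_step_eq cats card
  rw [hfold]
  have hnd : (sideboard.foldl (fun d c => d.modify (pvClassify c) [] (· ++ [c])) PySem.Dict.empty).keys.Nodup :=
    PySem.Dict.nodup_keys_foldl_modify_key sideboard pvClassify [] (fun _ card => (· ++ [card])) PySem.Dict.empty (by simp)
  rw [PySem.Dict.items_eq_map_keys _ hnd [], pv_keys_eq]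
  exact List.map_congr_left (fun k _ => by rw [pv_getD_eq])
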